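-- pv_equiv track=rewrite | github.com/adzai/adventofcode | 2020/aoc17.py | adjust_active
-- ===== SOURCE A (Python) =====
-- def is_neighbor(first, second):
--     for num1, num2 in zip(first, second):
--         if abs(num1 - num2) > 1:
--             return False
--     return True
--
-- def adjust_active(coordinates):
--     to_remove = []
--     for active in coordinates:
--         neighbors = 0
--         for i in range(len(coordinates)):
--             if active != coordinates[i]:
--                 if is_neighbor(active, coordinates[i]):
--                     neighbors += 1
--         if not (neighbors == 2 or neighbors == 3):
--             to_remove.append(active)
--     for c in to_remove:
--         coordinates.remove(c)
--     return coordinates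
-- ===== SOURCE B (Python) =====
-- # B: counts each distinct cell once via an insertion-ordered multiplicity table, then
-- # one pass over distinct cells adds whole multiplicities instead of re-scanning all pairs;
-- # survivors are kept by filtering (the list is still mutated in place and returned).
-- def is_close(a, b):
--     return all(abs(x - y) <= 1 for x, y in zip(a, b))
--
-- def adjust_active(coordinates):
--     mult = {}
--     for c in coordinates:
--         mult[tuple(c)] = mult.get(tuple(c), 0) + 1
--     good = []
--     for c in mult:
--         n = 0
--         for d in mult:
--             if d != c and is_close(c, d):
--                 n += mult[d]
--         if n == 2 or n == 3:
--             good.append(c)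
--     coordinates[:] = [c for c in coordinates if tuple(c) in good]
--     return coordinates
-- ===== Notes on version B (the rewrite author's own statement) =====
-- stated objective: alternative
-- what changed: B replaces A's all-pairs index scan and trailing one-by-one list.remove loop with a different traversal: it first builds an insertion-ordered multiplicity table of the distinct cells, counts neighbors once per distinct pair adding whole multiplicities, and keeps the survivors by a single filter.
import Mathlib
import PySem

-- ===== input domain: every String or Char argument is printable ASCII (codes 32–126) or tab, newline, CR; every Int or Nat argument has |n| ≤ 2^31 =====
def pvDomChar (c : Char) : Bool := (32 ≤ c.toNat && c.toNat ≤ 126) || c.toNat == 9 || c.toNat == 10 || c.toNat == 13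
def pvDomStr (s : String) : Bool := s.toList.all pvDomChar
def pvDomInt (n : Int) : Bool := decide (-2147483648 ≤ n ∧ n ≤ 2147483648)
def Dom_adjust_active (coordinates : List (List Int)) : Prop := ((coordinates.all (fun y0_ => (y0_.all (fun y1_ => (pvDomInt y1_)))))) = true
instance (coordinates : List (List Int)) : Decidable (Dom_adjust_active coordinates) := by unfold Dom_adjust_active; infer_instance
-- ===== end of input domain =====

-- B replaces the all-pairs neighbor scan by a multiplicity table over distinct cells and a
-- filter; equivalence is about the RETURN value (A mutates the list in place, B does too via
-- coordinates[:] = …, with the same final contents).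

-- ===== PORT A =====
-- 'for num1, num2 in zip(first, second): if abs(...) > 1: return False' / 'return True'
def is_neighbor_go : List (Int × Int) → Bool
  | [] => true
  | (a, b) :: rest => if 1 < (a - b).natAbs then false else is_neighbor_go rest

def is_neighbor (first second : List Int) : Bool :=
  is_neighbor_go (first.zip second)

def adjust_active (coordinates : List (List Int)) : List (List Int) :=
  let to_remove : List (List Int) :=
    coordinates.foldl (fun tr active =>
      let neighbors : Int :=
        (PySem.List.pyRange 0 (coordinates.length : Int) 1).foldl (fun n i =>
          -- i ranges over range(len(coordinates)), so the index is always in range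
          if active ≠ PySem.List.pyGetD coordinates i [] then
            (if is_neighbor active (PySem.List.pyGetD coordinates i []) then n + 1 else n)
          else n) 0
      if ¬ (neighbors = 2 ∨ neighbors = 3) then tr ++ [active] else tr) []
  -- 'for c in to_remove: coordinates.remove(c)'; each c is still present when removed,
  -- so the ValueError branch (the .getD fallback) is unreachable
  to_remove.foldl (fun cs c => (PySem.List.remove? cs c).getD cs) coordinates

-- ===== PORT B =====
def is_close (a b : List Int) : Bool :=
  (a.zip b).all (fun p => (p.1 - p.2).natAbs ≤ 1)

def adjust_active_alt (coordinates : List (List Int)) : List (List Int) :=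
  let mult : PySem.Dict (List Int) Int :=
    coordinates.foldl (fun m c => m.insert c (m.getD c 0 + 1)) PySem.Dict.empty
  let good : List (List Int) :=
    mult.keys.foldl (fun g c =>
      let n : Int :=
        mult.keys.foldl (fun n d =>
          if d ≠ c ∧ is_close c d then n + mult.getD d 0 else n) 0
      if n = 2 ∨ n = 3 then g ++ [c] else g) []
  coordinates.filter (fun c => good.contains c)

-- ===== PRECONDITION & SPEC =====
def Spec_adjust_active (coordinates : List (List Int)) (out : List (List Int)) : Prop := out = adjust_active_alt coordinates
instance (coordinates : List (List Int)) (out : List (List Int)) : Decidable (Spec_adjust_active coordinates out) := by unfold Spec_adjust_active; infer_instance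

-- ===== CLAIM (what is proved, stated in full; the proofs are below) =====
def Claim_equal_adjust_active : Prop := ∀ (coordinates : List (List Int)), Dom_adjust_active coordinates → Spec_adjust_active coordinates (adjust_active coordinates)

-- ===== LEMMAS AND PROOFS =====

-- the common characterisation: a is kept iff the number of cells ≠ a within Chebyshev
-- distance 1 (over the zipped prefix) is 2 or 3
def nbB (a c : List Int) : Bool := decide ¬(a = c) && is_close a c
def cntI (L : List (List Int)) (a : List Int) : Int := (L.countP (nbB a) : Int)
def goodB (L : List (List Int)) (a : List Int) : Bool := decide (cntI L a = 2 ∨ cntI L a = 3)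

theorem is_neighbor_go_eq (l : List (Int × Int)) :
    is_neighbor_go l = l.all (fun p => (p.1 - p.2).natAbs ≤ 1) := by
  induction l with
  | nil => rfl
  | cons p rest ih =>
    obtain ⟨x, y⟩ := p
    by_cases h : 1 < (x - y).natAbs
    · simp [is_neighbor_go, h, Nat.not_le.mpr h]
    · simp [is_neighbor_go, h, ih, Nat.le_of_not_lt h]

theorem is_neighbor_eq (a b : List Int) : is_neighbor a b = is_close a b := by
  unfold is_neighbor is_close
  exact is_neighbor_go_eq _

theorem countP_and_beq {α : Type} [BEq α] [LawfulBEq α] (L : List α) (q : α → Bool) (d : α) :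
    L.countP (fun c => q c && c == d) = if q d then L.count d else 0 := by
  induction L with
  | nil => simp
  | cons c L ih =>
    by_cases hcd : c = d
    · subst hcd
      by_cases hq : q c = true <;>
        simp [hq, ih]
    · have : (c == d) = false := by simp [hcd]
      simp [this, hcd, ih]

theorem countP_or_disjoint {α : Type} (L : List α) (p1 p2 : α → Bool)
    (h : ∀ c ∈ L, ¬(p1 c = true ∧ p2 c = true)) :
    L.countP (fun c => p1 c || p2 c) = L.countP p1 + L.countP p2 := by
  induction L with
  | nil => simp
  | cons c L ih =>
    have hc := h c (by simp)
    have ih' := ih (fun c hc => h c (by simp [hc]))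
    simp only [List.countP_cons, ih']
    rcases Bool.eq_false_or_eq_true (p1 c) with h1 | h1 <;>
      rcases Bool.eq_false_or_eq_true (p2 c) with h2 | h2
    · exact absurd ⟨h1, h2⟩ hc
    · simp [h1, h2]; omega
    · simp [h1, h2]; omega
    · simp [h1, h2]

theorem sum_nodup_count {α : Type} [BEq α] [LawfulBEq α] (K : List α) (hK : K.Nodup)
    (L : List α) (q : α → Bool) :
    ((K.map (fun d => if q d then (L.count d : Int) else 0)).sum : Int)
      = (L.countP (fun c => q c && K.contains c) : Int) := by
  induction K with
  | nil => simp
  | cons d K ih =>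
    have hd : d ∉ K := (List.nodup_cons.mp hK).1
    have hK' : K.Nodup := (List.nodup_cons.mp hK).2
    have hfun : ∀ c ∈ L, (q c && (d :: K).contains c) = true
        ↔ ((q c && c == d) || (q c && K.contains c)) = true := by
      intro c _
      rw [List.contains_cons, Bool.and_or_distrib_left]
    have hdisj : ∀ c ∈ L, ¬((q c && c == d) = true ∧ (q c && K.contains c) = true) := by
      intro c _ hcc
      have hc : c = d := by
        have := hcc.1; simp only [Bool.and_eq_true, beq_iff_eq] at this; exact this.2
      have hm : c ∈ K := by
        have := hcc.2; simp only [Bool.and_eq_true, List.contains_eq_mem,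
          decide_eq_true_eq] at this; exact this.2
      exact hd (hc ▸ hm)
    rw [List.countP_congr hfun, countP_or_disjoint L _ _ hdisj]
    simp only [List.map_cons, List.sum_cons, ih hK', countP_and_beq]
    split <;> push_cast <;> ring

theorem fold_remove_ne {α : Type} [BEq α] [LawfulBEq α] (cs : List α) (x : α) (l : List α)
    (h : ∀ c ∈ cs, c ≠ x) :
    cs.foldl (fun acc c => (PySem.List.remove? acc c).getD acc) (x :: l)
      = x :: cs.foldl (fun acc c => (PySem.List.remove? acc c).getD acc) l := by
  induction cs generalizing l with
  | nil => rfl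
  | cons c cs ih =>
    have hcx : x ≠ c := fun he => h c (by simp) he.symm
    simp only [List.foldl_cons, PySem.List.remove?_cons_of_ne l hcx]
    cases hr : PySem.List.remove? l c with
    | none => simpa [hr] using ih l (fun c hc => h c (by simp [hc]))
    | some l' => simpa [hr] using ih l' (fun c hc => h c (by simp [hc]))

theorem fold_remove_filter {α : Type} [BEq α] [LawfulBEq α] (L : List α) (p : α → Bool) :
    (L.filter p).foldl (fun acc c => (PySem.List.remove? acc c).getD acc) L
      = L.filter (fun x => !p x) := by
  induction L with
  | nil => rfl
  | cons x xs ih =>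
    by_cases hp : p x = true
    · simp only [List.filter_cons, hp, if_pos, List.foldl_cons,
        PySem.List.remove?_cons_self, Option.getD_some, ih]
      simp
    · have hne : ∀ c ∈ xs.filter p, c ≠ x := by
        intro c hc he
        have := List.of_mem_filter hc
        rw [he] at this
        exact hp this
      rw [List.filter_cons, if_neg (by simp [hp]), fold_remove_ne _ _ _ hne, ih]
      rw [List.filter_cons, if_pos (by simp [hp])]

theorem A_char (L : List (List Int)) : adjust_active L = L.filter (goodB L) := by
  unfold adjust_active
  have hstep : ∀ (a : List Int) (n : Int) (c : List Int),
      (if a ≠ c then (if is_neighbor a c then n + 1 else n) else n)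
        = if nbB a c = true then n + 1 else n := by
    intro a n c
    by_cases h1 : a = c <;> by_cases h2 : is_close a c = true <;>
      simp [nbB, h1, h2, is_neighbor_eq]
  have hinner : ∀ a : List Int,
      (PySem.List.pyRange 0 (L.length : Int) 1).foldl (fun n i =>
          if a ≠ PySem.List.pyGetD L i [] then
            (if is_neighbor a (PySem.List.pyGetD L i []) then n + 1 else n)
          else n) (0 : Int) = cntI L a := by
    intro a
    rw [PySem.List.foldl_pyRange_zero_pyGetD' L []
      (fun n ci => if a ≠ ci then (if is_neighbor a ci then n + 1 else n) else n) 0]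
    simp only [hstep]
    rw [PySem.List.foldl_if_add_one]
    simp [cntI]
  simp only [hinner]
  rw [PySem.List.foldl_append_ite_eq_filter
    (p := fun a => ¬ (cntI L a = 2 ∨ cntI L a = 3)), List.nil_append]
  have hpb : (fun a => decide ¬(cntI L a = 2 ∨ cntI L a = 3))
      = fun a => !goodB L a := by
    funext a; simp [goodB]
  rw [hpb, fold_remove_filter L (fun a => !goodB L a)]
  simp

theorem B_char (L : List (List Int)) : adjust_active_alt L = L.filter (goodB L) := by
  unfold adjust_active_alt
  simp only [PySem.Dict.foldl_insert_getD_add_one_eq_counter, PySem.Dict.keys_counter]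
  have hstep : ∀ (c : List Int) (n : Int) (d : List Int),
      (if d ≠ c ∧ is_close c d = true then n + (PySem.Dict.counter L).getD d 0 else n)
        = n + (if nbB c d = true then ((L.count d : Int)) else 0) := by
    intro c n d
    rw [PySem.Dict.getD_counter]
    by_cases h1 : d = c
    · subst h1; simp [nbB]
    · by_cases h2 : is_close c d = true
      · simp [nbB, h1, h2, Ne.symm h1]
      · simp [nbB, h1, h2]
  have hinner : ∀ c : List Int,
      (PySem.Set.ofList L).foldl (fun n d =>
          if d ≠ c ∧ is_close c d = true then n + (PySem.Dict.counter L).getD d 0 else n)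
        (0 : Int) = cntI L c := by
    intro c
    rw [PySem.List.foldl_congr_mem _ _
      (fun n d => n + (if nbB c d = true then ((L.count d : Int)) else 0)) 0
      (fun acc x _ => hstep c acc x)]
    rw [PySem.List.foldl_add]
    rw [sum_nodup_count (PySem.Set.ofList L) (PySem.Set.nodup_ofList L) L (nbB c)]
    have hmem : ∀ x ∈ L, (nbB c x && (PySem.Set.ofList L).contains x) = true
        ↔ nbB c x = true := by
      intro x hx
      simp [List.contains_eq_mem, (PySem.Set.mem_ofList L x).mpr hx]
    simp only [zero_add, cntI]
    exact_mod_cast List.countP_congr hmem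
  simp only [hinner]
  rw [PySem.List.foldl_append_ite_eq_filter
    (p := fun c => cntI L c = 2 ∨ cntI L c = 3), List.nil_append]
  apply List.filter_congr
  intro c hc
  rw [Bool.eq_iff_iff]
  simp [goodB, List.mem_filter, PySem.Set.mem_ofList, hc]

-- ===== VERDICT (by name: the statement is the Claim_ definition above) =====
theorem adjust_active_spec : Claim_equal_adjust_active := by
  intro L _
  unfold Spec_adjust_active
  rw [A_char, B_char]
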